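-- pv_equiv track=rewrite | github.com/naphattar/Comp_prog_2021-1 | Grader/jj7.py | get_secret
-- ===== SOURCE A (Python) =====
-- def get_secret(t):
--     result = ""
--     sec = t[0]
--     t = t[1:]
--     t = t.split(sec)
--     for i in range(len(t)):
--         if i%2 == 1:
--             result += t[i]
--     return result
-- ===== SOURCE B (Python) =====
-- def get_secret(t):
--     sec = t[0]
--     count = 0
--     out = []
--     for ch in t[1:]:
--         if ch == sec:
--             count += 1
--         elif count % 2 == 1:
--             out.append(ch)
--     return "".join(out)
-- ===== Notes on version B (the rewrite author's own statement) =====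
-- stated objective: alternative
-- what changed: Replaces split-into-a-segment-list-then-concatenate-odd-segments with a single character scan keeping only a running separator-parity counter, never materialising the segment list; it trades C-level str.split for an explicit O(1)-state pass.
import Mathlib
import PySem

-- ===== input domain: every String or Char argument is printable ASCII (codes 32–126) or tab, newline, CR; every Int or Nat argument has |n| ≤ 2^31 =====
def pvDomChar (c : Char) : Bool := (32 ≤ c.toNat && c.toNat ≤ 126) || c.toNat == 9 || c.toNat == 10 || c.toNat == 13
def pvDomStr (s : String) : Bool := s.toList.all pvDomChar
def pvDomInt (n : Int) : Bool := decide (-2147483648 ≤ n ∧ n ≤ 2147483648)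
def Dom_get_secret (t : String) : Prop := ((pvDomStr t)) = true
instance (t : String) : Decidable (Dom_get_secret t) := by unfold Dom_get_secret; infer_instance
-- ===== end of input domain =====

-- B replaces split-then-concatenate-odd-segments by a single scan with a separator-parity counter (no segment list built); a different decomposition, not claimed faster.


-- ===== PORT A =====
def get_secret (t : String) : String :=
  match PySem.Str.pyGet? t 0 with
  | none => ""      -- t[0] on empty t raises IndexError (excluded by Pre_)
  | some sec =>
    let t1 := PySem.List.slice t.toList (some 1) none
    let parts := PySem.Chars.splitOn t1 [sec]
    String.ofList ((PySem.List.pyRange 0 parts.length 1).foldl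
      (fun res i => if PySem.Int.mod i 2 = 1 then res ++ PySem.List.pyGetD parts i [] else res) [])

-- ===== PORT B =====
def pvAltGo (sec : Char) : List Char → Nat → List Char
  | [], _ => []
  | c :: cs, k =>
    if c = sec then pvAltGo sec cs (k + 1)
    else if k % 2 = 1 then c :: pvAltGo sec cs k
    else pvAltGo sec cs k

def get_secret_alt (t : String) : String :=
  match t.toList with
  | [] => ""        -- t[0] raises (excluded by Pre_)
  | sec :: rest => String.ofList (pvAltGo sec rest 0)

-- ===== PRECONDITION & SPEC =====
def Pre_get_secret (t : String) : Prop := t ≠ ""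
instance (t : String) : Decidable (Pre_get_secret t) := by unfold Pre_get_secret; infer_instance
def pvWitness_get_secret : String := "xaxbxc"
def Spec_get_secret (t : String) (out : String) : Prop := out = get_secret_alt t
instance (t : String) (out : String) : Decidable (Spec_get_secret t out) := by unfold Spec_get_secret; infer_instance

-- ===== CLAIM (what is proved, stated in full; the proofs are below) =====
def Claim_equal_get_secret : Prop := ∀ (t : String), Dom_get_secret t → Pre_get_secret t → Spec_get_secret t (get_secret t)

-- ===== LEMMAS AND PROOFS =====

-- single-character split, in the clean accumulator form
def pvSplit1 (c : Char) : List Char → List Char → List (List Char)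
  | [], cur => [cur.reverse]
  | x :: rest, cur =>
    if x = c then cur.reverse :: pvSplit1 c rest []
    else pvSplit1 c rest (x :: cur)

-- concatenation of the odd-indexed pieces, counting from k
def pvOddCat (k : Nat) : List (List Char) → List Char
  | [] => []
  | p :: ps => (if k % 2 = 1 then p else []) ++ pvOddCat (k + 1) ps

theorem pvGo_single (c : Char) : ∀ (fuel : Nat) (l cur : List Char) (acc : List (List Char)),
    l.length ≤ fuel →
    PySem.Chars.splitOn.go [c] fuel l cur acc = acc.reverse ++ pvSplit1 c l cur := by
  intro fuel
  induction fuel with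
  | zero =>
    intro l cur acc h
    have : l = [] := List.length_eq_zero_iff.mp (Nat.le_zero.mp h)
    subst this
    simp [PySem.Chars.splitOn.go, pvSplit1]
  | succ n ih =>
    intro l cur acc h
    cases l with
    | nil => simp [PySem.Chars.splitOn.go, pvSplit1]
    | cons x rest =>
      have hpref : [c].isPrefixOf (x :: rest) = (c == x) := by
        simp [List.isPrefixOf]
      by_cases hx : x = c
      · subst hx
        rw [PySem.Chars.splitOn.go, hpref, if_pos (by simp)]
        simp only [List.length_cons, List.length_nil, Nat.zero_add, List.drop_succ_cons,
          List.drop_zero]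
        rw [ih rest [] (cur.reverse :: acc) (by simpa using Nat.le_of_succ_le_succ h)]
        simp [pvSplit1]
      · rw [PySem.Chars.splitOn.go, hpref, if_neg (by simpa using Ne.symm hx)]
        rw [ih rest (x :: cur) acc (by simpa using Nat.le_of_succ_le_succ h)]
        simp [pvSplit1, hx]

theorem pvSplitOn_single (c : Char) (l : List Char) :
    PySem.Chars.splitOn l [c] = pvSplit1 c l [] := by
  unfold PySem.Chars.splitOn
  rw [pvGo_single c (l.length + 1) l [] [] (Nat.le_succ _)]
  simp

theorem pvFold_odd (parts : List (List Char)) :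
    ∀ (pre : List (List Char)) (acc : List Char),
    (PySem.List.pyRange (pre.length : Int) ((pre.length : Int) + (parts.length : Int)) 1).foldl
      (fun res i => if PySem.Int.mod i 2 = 1 then res ++ PySem.List.pyGetD (pre ++ parts) i [] else res) acc
      = acc ++ pvOddCat pre.length parts := by
  induction parts with
  | nil =>
    intro pre acc
    rw [PySem.List.pyRange_one_eq_nil (by simp)]
    simp [pvOddCat]
  | cons p ps ih =>
    intro pre acc
    rw [PySem.List.pyRange_one_cons (by push_cast [List.length_cons]; omega)]
    simp only [List.foldl_cons]
    have hget : PySem.List.pyGetD (pre ++ p :: ps) (pre.length : Int) [] = p := by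
      rw [PySem.List.pyGetD_natCast]
      simp [List.getD_eq_getElem?_getD]
    have hmod : (PySem.Int.mod (pre.length : Int) 2 = 1) ↔ (pre.length % 2 = 1) := by
      rw [show ((2 : Int) = ((2 : Nat) : Int)) by norm_num, PySem.Int.mod_natCast]
      exact_mod_cast Iff.rfl
    have harr : ∀ (a : List Char),
        (PySem.List.pyRange ((pre.length : Int) + 1) ((pre.length : Int) + ((p :: ps).length : Int)) 1).foldl
          (fun res i => if PySem.Int.mod i 2 = 1 then res ++ PySem.List.pyGetD (pre ++ p :: ps) i [] else res) a
        = a ++ pvOddCat (pre.length + 1) ps := by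
      intro a
      have h1 := ih (pre ++ [p]) a
      rw [show ((pre ++ [p]).length : Int) = (pre.length : Int) + 1 by simp,
        show (pre ++ [p]) ++ ps = pre ++ p :: ps by simp,
        show (pre ++ [p]).length = pre.length + 1 by simp] at h1
      rw [show (pre.length : Int) + ((p :: ps).length : Int)
            = ((pre.length : Int) + 1) + (ps.length : Int) by push_cast [List.length_cons]; ring]
      exact h1
    by_cases hpar : pre.length % 2 = 1
    · rw [if_pos (hmod.mpr hpar), hget, harr]
      simp [pvOddCat, hpar]
    · rw [if_neg (fun hc => hpar (hmod.mp hc)), harr]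
      simp [pvOddCat, hpar]

theorem pvOdd_split_alt (c : Char) : ∀ (l : List Char) (k : Nat) (cur : List Char),
    pvOddCat k (pvSplit1 c l cur)
      = (if k % 2 = 1 then cur.reverse else []) ++ pvAltGo c l k := by
  intro l
  induction l with
  | nil => intro k cur; simp [pvSplit1, pvOddCat, pvAltGo]
  | cons x rest ih =>
    intro k cur
    by_cases hx : x = c
    · subst hx
      simp only [pvSplit1, pvAltGo, ite_true, pvOddCat]
      rw [ih (k + 1) []]
      simp
    · simp only [pvSplit1, pvAltGo, if_neg hx]
      rw [ih k (x :: cur)]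
      by_cases hpar : k % 2 = 1 <;> simp [hpar]

-- ===== VERDICT (by name: the statement is the Claim_ definition above) =====
theorem get_secret_spec : Claim_equal_get_secret := by
  intro t _ hpre
  unfold Spec_get_secret get_secret get_secret_alt
  cases hl : t.toList with
  | nil => exact absurd (String.toList_eq_nil_iff.mp hl) hpre
  | cons sec rest =>
    have hget : PySem.Str.pyGet? t 0 = some sec := by
      simp [hl]
    rw [hget]
    rw [PySem.List.slice_from_one]
    simp only [List.tail_cons]
    rw [pvSplitOn_single]
    have := pvFold_odd (pvSplit1 sec rest []) [] []
    simp only [List.length_nil, Nat.cast_zero, zero_add, List.nil_append] at this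
    rw [this, pvOdd_split_alt]
    simp
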